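-- pv_equiv track=rewrite | github.com/drakegriffith/cs1301 | hw/HW09/HW09SOL.py | specialChar
-- ===== SOURCE A (Python) =====
-- def specialChar(usernames) :
--     if len(usernames) == 0 :
--         return {}
--     else :
--         speciCount = 0
--         for i in usernames[0] :
--             if i in ".~-_!#" :
--                 speciCount += 1
--
--         rememberName = usernames[0]
--         usernames.pop(0)
--         aDict = specialChar(usernames)
--         aDict[rememberName] = speciCount
--     return aDict
-- ===== SOURCE B (Python) =====
-- def specialChar(usernames):
--     result = {}
--     while usernames:
--         name = usernames.pop()
--         result[name] = sum(ch in ".~-_!#" for ch in name)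
--     return result
-- ===== Notes on version B (the rewrite author's own statement) =====
-- stated objective: simpler
-- what changed: Replaces the recursion (recurse on the tail, then assign the remembered head into the returned dict) by an iterative while-loop that pops names off the end of the list and assigns counts directly into one accumulator dict; counting uses sum() over a generator instead of a counter loop.
import Mathlib
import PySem

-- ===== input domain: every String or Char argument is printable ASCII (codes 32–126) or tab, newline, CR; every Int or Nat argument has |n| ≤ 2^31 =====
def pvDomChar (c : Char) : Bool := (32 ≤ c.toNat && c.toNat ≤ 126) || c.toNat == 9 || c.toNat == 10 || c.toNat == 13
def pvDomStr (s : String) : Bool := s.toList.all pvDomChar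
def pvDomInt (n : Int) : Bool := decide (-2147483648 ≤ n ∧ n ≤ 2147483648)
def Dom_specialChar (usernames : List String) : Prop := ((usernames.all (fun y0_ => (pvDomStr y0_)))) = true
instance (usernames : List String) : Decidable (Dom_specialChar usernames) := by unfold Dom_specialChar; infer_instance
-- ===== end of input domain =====

-- B replaces A's tail-recursion-then-assign by an iterative pop-from-the-end loop into one accumulator dict (same cost, simpler); both empty the input list in place.


-- ===== PORT A =====
-- recursion: base case {}, else count special chars of the head, pop it, recurse, assign
def specialCharRec : List String → PySem.Dict String Int
  | [] => PySem.Dict.empty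
  | u :: rest =>
      let speciCount : Int :=
        u.toList.foldl (fun acc i => if ".~-_!#".toList.contains i then acc + 1 else acc) 0
      (specialCharRec rest).insert u speciCount

def specialChar (usernames : List String) : List (String × Int) :=
  (specialCharRec usernames).items

-- ===== PORT B =====
-- while usernames: name = usernames.pop(); result[name] = sum(ch in ".~-_!#" for ch in name)
-- popping from the end means processing usernames in reverse order
def specialChar_alt (usernames : List String) : List (String × Int) :=
  (usernames.reverse.foldl
    (fun result name =>
      result.insert name
        (name.toList.foldl (fun acc ch => acc + (if ".~-_!#".toList.contains ch then 1 else 0)) (0 : Int)))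
    PySem.Dict.empty).items

-- ===== PRECONDITION & SPEC =====
def Spec_specialChar (usernames : List String) (out : List (String × Int)) : Prop := out = specialChar_alt usernames
instance (usernames : List String) (out : List (String × Int)) : Decidable (Spec_specialChar usernames out) := by unfold Spec_specialChar; infer_instance

-- ===== CLAIM (what is proved, stated in full; the proofs are below) =====
def Claim_equal_specialChar : Prop := ∀ (usernames : List String), Dom_specialChar usernames → Spec_specialChar usernames (specialChar usernames)

-- ===== LEMMAS AND PROOFS =====

-- the two per-string counting folds agree
theorem countFold_eq (l : List Char) (acc : Int) :
    l.foldl (fun acc i => if ".~-_!#".toList.contains i then acc + 1 else acc) acc =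
    l.foldl (fun acc ch => acc + (if ".~-_!#".toList.contains ch then 1 else 0)) acc := by
  induction l generalizing acc with
  | nil => rfl
  | cons c t ih =>
      simp only [List.foldl]
      by_cases h : ".~-_!#".toList.contains c
      · rw [if_pos h, if_pos h, ih]
      · rw [if_neg h, if_neg h, add_zero, ih]

-- B's reverse fold computes exactly A's recursion
theorem foldl_reverse_eq_rec (usernames : List String) :
    usernames.reverse.foldl
      (fun result name =>
        result.insert name
          (name.toList.foldl (fun acc ch => acc + (if ".~-_!#".toList.contains ch then 1 else 0)) (0 : Int)))
      PySem.Dict.empty = specialCharRec usernames := by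
  induction usernames with
  | nil => rfl
  | cons u rest ih =>
      simp only [List.reverse_cons, List.foldl_append, List.foldl, ih, specialCharRec]
      rw [countFold_eq]

-- ===== VERDICT (by name: the statement is the Claim_ definition above) =====
theorem specialChar_spec : Claim_equal_specialChar := by
  intro usernames _
  unfold Spec_specialChar specialChar specialChar_alt
  rw [foldl_reverse_eq_rec]
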